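-- pv_equiv track=rewrite | github.com/rkechols/KattisAssorted | prva.py | prva
-- ===== SOURCE A (Python) =====
-- from typing import List
--
-- BLOCK = "#"
--
-- def prva(all_scores: List[str]) -> str:
-- 	best_word = None
-- 	best_len = None
-- 	# rows
-- 	for row in all_scores:
-- 		options = row.split(BLOCK)
-- 		for option in options:
-- 			this_len = len(option)
-- 			if this_len < 2:
-- 				continue
-- 			if best_len is None or this_len < best_len:
-- 				best_len = this_len
-- 				best_word = option
-- 	# columns
-- 	for col_num in range(len(all_scores[0])):  # all are the same length, so the first will do
-- 		col = "".join([row[col_num] for row in all_scores])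
-- 		options = col.split(BLOCK)
-- 		for option in options:
-- 			this_len = len(option)
-- 			if this_len < 2:
-- 				continue
-- 			if best_len is None or this_len < best_len:
-- 				best_len = this_len
-- 				best_word = option
-- 	return best_word
-- ===== SOURCE B (Python) =====
-- from typing import List
--
-- BLOCK = "#"
--
-- def _consider(best, word):
-- 	if len(word) >= 2 and (best is None or len(word) < len(best)):
-- 		return word
-- 	return best
--
-- def _scan(chars, best):
-- 	run = []
-- 	for ch in chars:
-- 		if ch == BLOCK:
-- 			best = _consider(best, "".join(run))
-- 			run = []
-- 		else:
-- 			run.append(ch)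
-- 	return _consider(best, "".join(run))
--
-- def prva(all_scores: List[str]) -> str:
-- 	best = None
-- 	for row in all_scores:
-- 		best = _scan(row, best)
-- 	for c in range(len(all_scores[0])):
-- 		best = _scan((row[c] for row in all_scores), best)
-- 	return best
-- ===== Notes on version B (the rewrite author's own statement) =====
-- stated objective: alternative
-- what changed: Replaces A's split('#')-and-compare-lengths passes by a character-level run-length scanner: each row (and each column, read cell by cell without building a column string) is swept once, accumulating the current '#'-free run and closing it at each '#' or at end of line, keeping the shortest run of length >= 2 seen first.
import Mathlib
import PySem

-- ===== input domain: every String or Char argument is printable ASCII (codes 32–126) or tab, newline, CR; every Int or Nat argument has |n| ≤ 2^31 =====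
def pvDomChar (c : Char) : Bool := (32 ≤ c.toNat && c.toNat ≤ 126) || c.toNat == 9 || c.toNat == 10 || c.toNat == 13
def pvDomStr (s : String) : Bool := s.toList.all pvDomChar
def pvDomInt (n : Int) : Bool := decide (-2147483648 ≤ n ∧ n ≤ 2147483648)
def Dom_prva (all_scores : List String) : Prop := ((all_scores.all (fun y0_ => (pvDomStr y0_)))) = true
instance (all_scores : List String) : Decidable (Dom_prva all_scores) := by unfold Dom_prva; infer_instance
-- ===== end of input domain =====

-- B replaces A's split('#') + best-length bookkeeping by a character-level run scanner
-- (rows and columns swept cell by cell, runs closed at '#' or end of line); same cost,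
-- a genuinely different mechanism.

-- ===== PORT A =====
-- row.split("#") (sep is non-empty, so split? always returns some)
def pySplitHash (s : String) : List String := (PySem.Str.split? s "#").getD []

-- "".join([row[col_num] for row in all_scores]) for A's column build
def prvaCol (all_scores : List String) (c : Int) : String :=
  String.ofList (all_scores.map (fun row => (PySem.Str.pyGet? row c).getD ' '))

def prvaStep (st : Option String × Option Int) (opt : String) : Option String × Option Int :=
  let thisLen := PySem.Str.len opt
  if thisLen < 2 then st
  else
    match st.2 with
    | none => (some opt, some thisLen)
    | some b => if thisLen < b then (some opt, some thisLen) else st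

def prva (all_scores : List String) : Option String :=
  -- rows fold, then columns fold over range(len(all_scores[0]))
  ((PySem.List.pyRange 0 (PySem.Str.len (all_scores.headD "")) 1).foldl
      (fun st c => (pySplitHash (prvaCol all_scores c)).foldl prvaStep st)
      (all_scores.foldl (fun st row => (pySplitHash row).foldl prvaStep st) (none, none))).1

-- ===== PORT B =====
-- _consider(best, word)
def prvaConsider (best : Option (List Char)) (word : List Char) : Option (List Char) :=
  if 2 ≤ word.length then
    match best with
    | none => some word
    | some m => if word.length < m.length then some word else best
  else best

-- _scan(chars, best): run accumulated in reverse (Python's list append)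
def prvaScan (chars : List Char) (best : Option (List Char)) : Option (List Char) :=
  let st := chars.foldl
      (fun (p : List Char × Option (List Char)) ch =>
        if ch = '#' then ([], prvaConsider p.2 p.1.reverse) else (ch :: p.1, p.2))
      ([], best)
  prvaConsider st.2 st.1.reverse

-- the chars of column c, read cell by cell (row[c] for row in all_scores)
def prvaColChars (all_scores : List String) (c : Int) : List Char :=
  all_scores.map (fun row => (PySem.Str.pyGet? row c).getD ' ')

def prva_alt (all_scores : List String) : Option String :=
  ((PySem.List.pyRange 0 (PySem.Str.len (all_scores.headD "")) 1).foldl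
      (fun b c => prvaScan (prvaColChars all_scores c) b)
      (all_scores.foldl (fun b row => prvaScan row.toList b) none)).map String.ofList

-- ===== PRECONDITION & SPEC =====
-- Pre_ excludes exactly the inputs where Python A raises IndexError: the empty list
-- (all_scores[0]) and ragged grids where some row is shorter than the first row (row[col_num]).
def Pre_prva (all_scores : List String) : Prop :=
  all_scores ≠ [] ∧ ∀ s ∈ all_scores, PySem.Str.len (all_scores.headD "") ≤ PySem.Str.len s
instance (all_scores : List String) : Decidable (Pre_prva all_scores) := by
  unfold Pre_prva; infer_instance

def pvWitness_prva : List String := (["ab#", "#aa", "bbb"])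

def Spec_prva (all_scores : List String) (out : Option String) : Prop := out = prva_alt all_scores
instance (all_scores : List String) (out : Option String) : Decidable (Spec_prva all_scores out) := by
  unfold Spec_prva; infer_instance

-- ===== CLAIM =====
def Claim_equal_prva : Prop := ∀ (all_scores : List String), Dom_prva all_scores → Pre_prva all_scores → Spec_prva all_scores (prva all_scores)

-- ===== LEMMAS AND PROOFS =====

-- structural single-char split on '#'
def splitH : List Char → List (List Char)
  | [] => [[]]
  | c :: rest =>
    if c = '#' then [] :: splitH rest
    else
      match splitH rest with
      | p :: ps => (c :: p) :: ps
      | [] => [[c]]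

def mapHead (f : List Char → List Char) : List (List Char) → List (List Char)
  | [] => []
  | p :: ps => f p :: ps

theorem splitH_ne_nil (cs : List Char) : splitH cs ≠ [] := by
  cases cs with
  | nil => simp [splitH]
  | cons c rest =>
    simp only [splitH]
    split_ifs
    · simp
    · cases h : splitH rest <;> simp

-- PySem's splitOn with separator "#" is splitH
theorem splitOn_go_eq (cs : List Char) : ∀ (fuel : Nat) (cur : List Char) (acc : List (List Char)),
    cs.length < fuel →
    PySem.Chars.splitOn.go ['#'] fuel cs cur acc
      = acc.reverse ++ mapHead (cur.reverse ++ ·) (splitH cs) := by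
  induction cs with
  | nil =>
    intro fuel cur acc hf
    match fuel, hf with
    | fuel + 1, _ =>
      rw [PySem.Chars.splitOn.go.eq_def]
      simp [splitH, mapHead]
  | cons c rest ih =>
    intro fuel cur acc hf
    match fuel, hf with
    | fuel + 1, hf =>
      rw [PySem.Chars.splitOn.go.eq_def]
      by_cases hc : c = '#'
      · subst hc
        simp only [List.isPrefixOf, List.length_cons] at *
        simp only [beq_self_eq_true, Bool.true_and, if_true, List.length_nil,
          Nat.zero_add, List.drop_succ_cons, List.drop_zero]
        rw [ih fuel [] (cur.reverse :: acc) (by omega)]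
        simp [splitH]
        cases h : splitH rest with
        | nil => exact absurd h (splitH_ne_nil rest)
        | cons p ps => simp [mapHead]
      · have : (['#'].isPrefixOf (c :: rest)) = false := by
          simp [List.isPrefixOf]; exact fun h => absurd h.symm hc
        simp only [this, Bool.false_eq_true, if_false]
        rw [ih fuel (c :: cur) acc (by simp at hf ⊢; omega)]
        simp only [splitH, if_neg hc]
        cases h : splitH rest with
        | nil => exact absurd h (splitH_ne_nil rest)
        | cons p ps => simp [mapHead, List.reverse_cons]
      
theorem splitOn_hash (cs : List Char) :
    PySem.Chars.splitOn cs ['#'] = splitH cs := by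
  unfold PySem.Chars.splitOn
  rw [splitOn_go_eq cs (cs.length + 1) [] [] (by omega)]
  simp only [List.reverse_nil, List.nil_append]
  cases h : splitH cs with
  | nil => exact absurd h (splitH_ne_nil cs)
  | cons p ps => simp [mapHead]

-- B's scan = fold of consider over the splitH pieces
theorem scan_eq_foldl (cs : List Char) : ∀ (run : List Char) (b : Option (List Char)),
    prvaConsider (cs.foldl
        (fun (p : List Char × Option (List Char)) ch =>
          if ch = '#' then ([], prvaConsider p.2 p.1.reverse) else (ch :: p.1, p.2))
        (run, b)).2
      (cs.foldl
        (fun (p : List Char × Option (List Char)) ch =>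
          if ch = '#' then ([], prvaConsider p.2 p.1.reverse) else (ch :: p.1, p.2))
        (run, b)).1.reverse
      = (mapHead (run.reverse ++ ·) (splitH cs)).foldl prvaConsider b := by
  induction cs with
  | nil => intro run b; simp [splitH, mapHead]
  | cons c rest ih =>
    intro run b
    by_cases hc : c = '#'
    · subst hc
      simp only [List.foldl_cons, if_true, splitH, mapHead]
      rw [ih [] (prvaConsider b run.reverse)]
      cases h : splitH rest with
      | nil => exact absurd h (splitH_ne_nil rest)
      | cons p ps => simp [mapHead]
    · simp only [List.foldl_cons, if_neg hc, splitH]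
      rw [ih (c :: run) b]
      cases h : splitH rest with
      | nil => exact absurd h (splitH_ne_nil rest)
      | cons p ps => simp [mapHead]

theorem prvaScan_eq (cs : List Char) (b : Option (List Char)) :
    prvaScan cs b = (splitH cs).foldl prvaConsider b := by
  unfold prvaScan
  rw [scan_eq_foldl cs [] b]
  cases h : splitH cs with
  | nil => exact absurd h (splitH_ne_nil cs)
  | cons p ps => simp [mapHead]

-- state correspondence A-state = pack of B-state
def prvaPack (b : Option (List Char)) : Option String × Option Int :=
  (b.map String.ofList, b.map (fun r => (r.length : Int)))

theorem step_pack (b : Option (List Char)) (p : List Char) :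
    prvaStep (prvaPack b) (String.ofList p) = prvaPack (prvaConsider b p) := by
  have hlen : PySem.Str.len (String.ofList p) = (p.length : Int) := by simp
  cases b with
  | none =>
    simp only [prvaPack, prvaStep, prvaConsider, Option.map_none, hlen]
    by_cases h2 : 2 ≤ p.length
    · rw [if_neg (by exact_mod_cast not_lt.mpr (by exact_mod_cast h2)), if_pos h2]; rfl
    · rw [if_pos (by exact_mod_cast lt_of_not_ge h2), if_neg h2]; rfl
  | some m =>
    simp only [prvaPack, prvaStep, prvaConsider, Option.map_some, hlen]
    by_cases h2 : 2 ≤ p.length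
    · rw [if_neg (by exact_mod_cast not_lt.mpr (by exact_mod_cast h2)), if_pos h2]
      by_cases hlt : p.length < m.length
      · rw [if_pos (by exact_mod_cast hlt), if_pos hlt]; rfl
      · rw [if_neg (by exact_mod_cast hlt), if_neg hlt]; rfl
    · rw [if_pos (by exact_mod_cast lt_of_not_ge h2), if_neg h2]; rfl

-- per line: A's fold over split pieces = pack of B's scan
theorem line_pack (s : String) (b : Option (List Char)) :
    (pySplitHash s).foldl prvaStep (prvaPack b) = prvaPack (prvaScan s.toList b) := by
  have hsplit : pySplitHash s = (splitH s.toList).map String.ofList := by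
    unfold pySplitHash
    simp [PySem.Str.split?, PySem.Chars.split?, splitOn_hash]
  rw [hsplit, List.foldl_map, prvaScan_eq]
  induction splitH s.toList generalizing b with
  | nil => rfl
  | cons p ps ih => simp only [List.foldl_cons, step_pack, ih]

-- fold a pack-commuting step over any list
theorem foldl_pack {α : Type} (xs : List α) (f : Option String × Option Int → α → Option String × Option Int)
    (g : Option (List Char) → α → Option (List Char))
    (h : ∀ b x, f (prvaPack b) x = prvaPack (g b x)) (b : Option (List Char)) :
    xs.foldl f (prvaPack b) = prvaPack (xs.foldl g b) := by
  induction xs generalizing b with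
  | nil => rfl
  | cons x t ih => simp only [List.foldl_cons, h, ih]

theorem col_toList (all_scores : List String) (c : Int) :
    (prvaCol all_scores c).toList = prvaColChars all_scores c := by
  simp [prvaCol, prvaColChars]

-- ===== VERDICT =====
theorem prva_spec : Claim_equal_prva := by
  intro all_scores _ _
  unfold Spec_prva prva prva_alt
  have h0 : ((none : Option String), (none : Option Int)) = prvaPack none := rfl
  rw [h0,
    foldl_pack all_scores _ (fun b row => prvaScan row.toList b)
      (fun b row => line_pack row b) none,
    foldl_pack _ _ (fun b c => prvaScan (prvaColChars all_scores c) b)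
      (fun b c => by
        show List.foldl prvaStep (prvaPack b) (pySplitHash (prvaCol all_scores c))
            = prvaPack (prvaScan (prvaColChars all_scores c) b)
        rw [← col_toList all_scores c]; exact line_pack (prvaCol all_scores c) b)]
  rfl
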